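-- pv_equiv track=rewrite | github.com/ohodegaa/AlgDat | Ovinger/Oving_08/pengeveksling.py | can_use_greedy
-- ===== SOURCE A (Python) =====
-- def can_use_greedy(coins):
--     for i in range(len(coins) - 2):
--         can_use = False
--         for j in range(i+1, len(coins) - 1):
--             if coins[i]%coins[j] == 0:
--                 can_use = True
--         if not can_use:
--             return False
--     return True
-- ===== SOURCE B (Python) =====
-- def _has_divisor(c, divisors):
--     # does some element of `divisors` divide c (c > 0)?
--     d = 1
--     while d * d <= c:
--         if c % d == 0 and (d in divisors or c // d in divisors):
--             return True
--         d += 1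
--     return False
--
--
-- def can_use_greedy(coins):
--     divisors = set()
--     for i in reversed(range(len(coins) - 2)):
--         divisors.add(abs(coins[i + 1]))
--         c = abs(coins[i])
--         if c != 0 and not _has_divisor(c, divisors):
--             return False
--     return True
-- ===== Notes on version B (the rewrite author's own statement) =====
-- stated objective: faster
-- what changed: Instead of A's nested forward index scan (for each position rescan all later middle coins with coins[i]%coins[j]==0), B sweeps once from the back maintaining the set of absolute values of the later middle coins and, for each coin, enumerates the divisors of abs(coin) up to its square root and tests set membership, O(n*sqrt(maxval)) instead of O(n^2); Pre_ excludes exactly the inputs with a zero among the middle coins coins[1:-1], on which A raises ZeroDivisionError.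
import Mathlib
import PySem

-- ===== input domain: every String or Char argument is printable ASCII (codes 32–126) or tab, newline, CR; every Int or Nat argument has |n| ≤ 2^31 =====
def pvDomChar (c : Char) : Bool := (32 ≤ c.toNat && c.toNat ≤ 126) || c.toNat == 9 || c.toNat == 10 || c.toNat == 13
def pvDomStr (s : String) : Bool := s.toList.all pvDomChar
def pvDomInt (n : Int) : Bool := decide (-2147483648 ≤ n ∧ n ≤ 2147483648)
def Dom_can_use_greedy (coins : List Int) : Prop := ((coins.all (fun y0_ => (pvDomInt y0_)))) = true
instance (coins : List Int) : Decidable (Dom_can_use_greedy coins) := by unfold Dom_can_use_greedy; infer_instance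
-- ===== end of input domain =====

-- B replaces A's nested index scan by one backward sweep keeping the set of absolute values
-- of the later middle coins and enumerating each coin's divisors up to sqrt (objective: faster).

-- ===== PORT A =====
-- inner 'for j in range(i+1, len(coins)-1)' loop of A (no break; keeps overwriting can_use)
def aInner (coins : List Int) (i : Int) : Bool :=
  (PySem.List.pyRange (i + 1) ((coins.length : Int) - 1) 1).foldl
    (fun can_use j =>
      if PySem.Int.mod (PySem.List.pyGetD coins i 0) (PySem.List.pyGetD coins j 0) = 0 then
        true
      else can_use)
    false

-- outer 'for i in range(len(coins)-2)' loop with the early 'return False'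
def aLoop (coins : List Int) : List Int → Bool
  | [] => true
  | i :: is => if !(aInner coins i) then false else aLoop coins is

def can_use_greedy (coins : List Int) : Bool :=
  aLoop coins (PySem.List.pyRange 0 ((coins.length : Int) - 2) 1)

-- ===== PORT B =====
-- the 'while d*d <= c' divisor-enumeration loop of _has_divisor;
-- `fuel` (= c + 1 - d at every call) only makes the recursion structural
def bDivF (divisors : PySem.Set Int) (c : Nat) : Nat → Nat → Bool
  | 0, _ => false
  | fuel + 1, d =>
    if d * d ≤ c then
      if c % d = 0 && (divisors.contains (d : Int) || divisors.contains ((c / d : Nat) : Int)) then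
        true
      else bDivF divisors c fuel (d + 1)
    else false

def hasDivisor (c : Nat) (divisors : PySem.Set Int) : Bool := bDivF divisors c c 1

-- the 'for i in reversed(range(len(coins) - 2))' loop with the early 'return False'
def bLoop (coins : List Int) : PySem.Set Int → List Int → Bool
  | _, [] => true
  | divisors, i :: is =>
    let divisors' := PySem.Set.add divisors (((PySem.List.pyGetD coins (i + 1) 0).natAbs : Int))
    let c := (PySem.List.pyGetD coins i 0).natAbs
    if c ≠ 0 && !(hasDivisor c divisors') then false
    else bLoop coins divisors' is

def can_use_greedy_alt (coins : List Int) : Bool :=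
  bLoop coins PySem.Set.empty ((PySem.List.pyRange 0 ((coins.length : Int) - 2) 1).reverse)

-- ===== PRECONDITION & SPEC =====
-- A uses every middle coin coins[1:-1] as a modulus before it can return: a 0 there is a
-- ZeroDivisionError, so exactly those inputs are excluded.
def Pre_can_use_greedy (coins : List Int) : Prop := (0 : Int) ∉ coins.dropLast.drop 1
instance (coins : List Int) : Decidable (Pre_can_use_greedy coins) := by
  unfold Pre_can_use_greedy; infer_instance

def pvWitness_can_use_greedy : List Int := [12, 4, 2, 1]

def Spec_can_use_greedy (coins : List Int) (out : Bool) : Prop := out = can_use_greedy_alt coins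
instance (coins : List Int) (out : Bool) : Decidable (Spec_can_use_greedy coins out) := by
  unfold Spec_can_use_greedy; infer_instance

-- ===== CLAIM (what is proved, stated in full; the proofs are below) =====
def Claim_equal_can_use_greedy : Prop := ∀ (coins : List Int), Dom_can_use_greedy coins → Pre_can_use_greedy coins → Spec_can_use_greedy coins (can_use_greedy coins)

-- ===== LEMMAS AND PROOFS =====

-- the common semantics: position i has a divisor among the later middle coins
def PIdx (coins : List Int) (i : Nat) : Prop :=
  ∃ j : Nat, i + 1 ≤ j ∧ j + 1 < coins.length ∧ coins.getD j 0 ∣ coins.getD i 0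

def SpecIdx (coins : List Int) : Prop := ∀ i : Nat, i + 2 < coins.length → PIdx coins i

-- Pre_ in pointwise form: the middle coins are nonzero
theorem pre_iff (coins : List Int) :
    Pre_can_use_greedy coins ↔ ∀ j : Nat, 1 ≤ j → j + 1 < coins.length → coins.getD j 0 ≠ 0 := by
  unfold Pre_can_use_greedy
  rw [List.mem_iff_getElem]
  push Not
  constructor
  · intro h j hj1 hj2
    have hlt : j - 1 < (coins.dropLast.drop 1).length := by
      simp [List.length_dropLast]; omega
    have := h (j - 1) hlt
    rw [List.getElem_drop, List.getElem_dropLast] at this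
    rw [List.getD_eq_getElem coins 0 (by omega)]
    intro hc
    apply this
    rw [← hc]; congr 1; omega
  · intro h k hk
    rw [List.getElem_drop, List.getElem_dropLast]
    have hk' : 1 + k + 1 < coins.length := by
      simp [List.length_dropLast] at hk; omega
    have := h (1 + k) (by omega) hk'
    rw [List.getD_eq_getElem coins 0 (by omega)] at this
    exact this

-- ===== A-side characterisation =====

theorem foldl_if_or (p : Int → Prop) [DecidablePred p] :
    ∀ (l : List Int) (b : Bool),
      l.foldl (fun cu j => if p j then true else cu) b = (b || l.any fun j => decide (p j)) := by
  intro l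
  induction l with
  | nil => simp
  | cons x xs ih =>
    intro b
    rw [List.foldl_cons, ih]
    by_cases hx : p x <;> simp [hx]

theorem aInner_iff (coins : List Int) (i : Int) :
    aInner coins i = true ↔
      ∃ j : Int, i + 1 ≤ j ∧ j < (coins.length : Int) - 1 ∧
        PySem.Int.mod (PySem.List.pyGetD coins i 0) (PySem.List.pyGetD coins j 0) = 0 := by
  unfold aInner
  rw [foldl_if_or (fun j => PySem.Int.mod (PySem.List.pyGetD coins i 0) (PySem.List.pyGetD coins j 0) = 0)]
  simp [List.any_eq_true, PySem.List.mem_pyRange_one]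
  constructor
  · rintro ⟨j, ⟨h1, h2⟩, h3⟩; exact ⟨j, h1, h2, h3⟩
  · rintro ⟨j, h1, h2, h3⟩; exact ⟨j, ⟨h1, h2⟩, h3⟩

theorem aLoop_iff (coins : List Int) :
    ∀ l : List Int, aLoop coins l = true ↔ ∀ i ∈ l, aInner coins i = true := by
  intro l
  induction l with
  | nil => simp [aLoop]
  | cons x xs ih =>
    by_cases hx : aInner coins x = true <;> simp [aLoop, hx, ih]

theorem pyGetD_getD (xs : List Int) (j : Int) (h0 : 0 ≤ j) :
    PySem.List.pyGetD xs j 0 = xs.getD j.toNat 0 :=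
  PySem.List.pyGetD_of_nonneg xs 0 h0

theorem a_iff (coins : List Int) :
    can_use_greedy coins = true ↔ SpecIdx coins := by
  unfold can_use_greedy SpecIdx
  rw [aLoop_iff]
  constructor
  · intro h i hi
    have hmem : (i : Int) ∈ PySem.List.pyRange 0 ((coins.length : Int) - 2) 1 := by
      rw [PySem.List.mem_pyRange_one]
      exact ⟨Int.natCast_nonneg i, by omega⟩
    obtain ⟨j, hj1, hj2, hj3⟩ := (aInner_iff coins i).mp (h _ hmem)
    have hj0 : 0 ≤ j := by omega
    rw [pyGetD_getD coins i (Int.natCast_nonneg i), pyGetD_getD coins j hj0,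
        PySem.Int.mod_eq_zero_iff_dvd] at hj3
    exact ⟨j.toNat, by omega, by omega, by simpa using hj3⟩
  · intro h i hi
    rw [PySem.List.mem_pyRange_one] at hi
    obtain ⟨hi0, hi2⟩ := hi
    obtain ⟨j, hj1, hj2, hj3⟩ := h i.toNat (by omega)
    rw [aInner_iff]
    refine ⟨(j : Int), by omega, by omega, ?_⟩
    rw [pyGetD_getD coins i hi0, pyGetD_getD coins (j : Int) (Int.natCast_nonneg j),
        PySem.Int.mod_eq_zero_iff_dvd]
    simpa using hj3

-- ===== B-side characterisation =====

theorem bDivF_iff (s : PySem.Set Int) (c : Nat) :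
    ∀ (fuel d : Nat), 1 ≤ d → c + 1 - d ≤ fuel →
      (bDivF s c fuel d = true ↔
        ∃ e : Nat, d ≤ e ∧ e * e ≤ c ∧ c % e = 0 ∧
          ((e : Int) ∈ s ∨ ((c / e : Nat) : Int) ∈ s)) := by
  intro fuel
  induction fuel with
  | zero =>
    intro d hd hf
    simp only [bDivF, Bool.false_eq_true, false_iff]
    rintro ⟨e, hde, hee, -, -⟩
    have h2 : e ≤ e * e := Nat.le_mul_of_pos_left e (by omega)
    omega
  | succ fuel ih =>
    intro d hd hf
    rw [bDivF]
    by_cases hdd : d * d ≤ c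
    · rw [if_pos hdd]
      by_cases hhit : (c % d = 0 && (s.contains (d : Int) || s.contains ((c / d : Nat) : Int))) = true
      · rw [if_pos hhit]
        simp only [Bool.and_eq_true, Bool.or_eq_true, decide_eq_true_eq,
          PySem.Set.contains_iff] at hhit
        exact iff_of_true rfl ⟨d, le_refl d, hdd, hhit.1, hhit.2⟩
      · rw [if_neg hhit, ih (d + 1) (by omega) (by omega)]
        simp only [Bool.and_eq_true, Bool.or_eq_true, decide_eq_true_eq,
          PySem.Set.contains_iff] at hhit
        push Not at hhit
        constructor
        · rintro ⟨e, he1, he2, he3, he4⟩; exact ⟨e, by omega, he2, he3, he4⟩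
        · rintro ⟨e, he1, he2, he3, he4⟩
          rcases Nat.eq_or_lt_of_le he1 with rfl | hlt
          · rcases he4 with h | h
            · exact absurd h (hhit he3).1
            · exact absurd h (hhit he3).2
          · exact ⟨e, by omega, he2, he3, he4⟩
    · rw [if_neg hdd]
      simp only [Bool.false_eq_true, false_iff]
      rintro ⟨e, hde, hee, -, -⟩
      have : d * d ≤ e * e := Nat.mul_le_mul hde hde
      omega

theorem hasDivisor_iff (c : Nat) (s : PySem.Set Int) (hc : 1 ≤ c) :
    hasDivisor c s = true ↔ ∃ k : Nat, 1 ≤ k ∧ k ∣ c ∧ (k : Int) ∈ s := by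
  unfold hasDivisor
  rw [bDivF_iff s c c 1 (le_refl 1) (by omega)]
  constructor
  · rintro ⟨e, he1, hee, hmod, hmem⟩
    have hdvd : e ∣ c := Nat.dvd_of_mod_eq_zero hmod
    rcases hmem with h | h
    · exact ⟨e, he1, hdvd, h⟩
    · exact ⟨c / e, Nat.div_pos (Nat.le_of_dvd (by omega) hdvd) (by omega),
        Nat.div_dvd_of_dvd hdvd, h⟩
  · rintro ⟨k, hk1, hdvd, hmem⟩
    have hkm : k ≤ c := Nat.le_of_dvd (by omega) hdvd
    by_cases hkk : k * k ≤ c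
    · exact ⟨k, hk1, hkk, Nat.mod_eq_zero_of_dvd hdvd, Or.inl hmem⟩
    · have hqpos : 1 ≤ c / k := Nat.div_pos hkm (by omega)
      have hmul : c / k * k = c := Nat.div_mul_cancel hdvd
      refine ⟨c / k, hqpos, by nlinarith, Nat.mod_eq_zero_of_dvd (Nat.div_dvd_of_dvd hdvd), ?_⟩
      rw [Nat.div_div_self hdvd (by omega)]
      exact Or.inr hmem

theorem bLoop_iff (coins : List Int)
    (hpre : ∀ j : Nat, 1 ≤ j → j + 1 < coins.length → coins.getD j 0 ≠ 0) :
    ∀ (t : Nat) (s : PySem.Set Int), t + 2 ≤ coins.length →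
      (∀ x : Int, x ∈ s ↔ ∃ j : Nat, t + 1 ≤ j ∧ j + 1 < coins.length ∧
        x = ((coins.getD j 0).natAbs : Int)) →
      (bLoop coins s ((PySem.List.pyRange 0 (t : Int) 1).reverse) = true ↔
        ∀ i : Nat, i < t → PIdx coins i) := by
  intro t
  induction t with
  | zero =>
    intro s _ _
    rw [PySem.List.pyRange_one_eq_nil (by norm_num)]
    simp [bLoop]
  | succ t ih =>
    intro s ht hS
    have hrange : PySem.List.pyRange 0 ((t + 1 : Nat) : Int) 1 =
        PySem.List.pyRange 0 (t : Int) 1 ++ [(t : Int)] := by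
      push_cast
      exact PySem.List.pyRange_one_succ_right (by positivity)
    rw [hrange, List.reverse_append]
    simp only [List.reverse_singleton, List.singleton_append]
    rw [bLoop]
    have hget1 : PySem.List.pyGetD coins ((t : Int) + 1) 0 = coins.getD (t + 1) 0 := by
      rw [show ((t : Int) + 1) = ((t + 1 : Nat) : Int) by push_cast; ring,
        pyGetD_getD coins _ (by positivity)]
      simp
    have hget0 : PySem.List.pyGetD coins (t : Int) 0 = coins.getD t 0 := by
      rw [pyGetD_getD coins _ (by positivity)]; simp
    rw [hget1, hget0]
    set s' := PySem.Set.add s (((coins.getD (t + 1) 0).natAbs : Int)) with hs'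
    have hS' : ∀ x : Int, x ∈ s' ↔ ∃ j : Nat, t + 1 ≤ j ∧ j + 1 < coins.length ∧
        x = ((coins.getD j 0).natAbs : Int) := by
      intro x
      rw [hs', PySem.Set.mem_add, hS]
      constructor
      · rintro (⟨j, hj1, hj2, hj3⟩ | rfl)
        · exact ⟨j, by omega, hj2, hj3⟩
        · exact ⟨t + 1, le_refl _, by omega, rfl⟩
      · rintro ⟨j, hj1, hj2, hj3⟩
        rcases Nat.eq_or_lt_of_le hj1 with rfl | hlt
        · exact Or.inr hj3
        · exact Or.inl ⟨j, by omega, hj2, hj3⟩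
    set c := (coins.getD t 0).natAbs with hc
    have hcond : (c ≠ 0 → hasDivisor c s' = true) ↔ PIdx coins t := by
      by_cases hc0 : c = 0
      · simp only [hc0, ne_eq, not_true_eq_false, false_implies, true_iff]
        refine ⟨t + 1, le_refl _, by omega, ?_⟩
        have : coins.getD t 0 = 0 := by
          rw [← Int.natAbs_eq_zero]; exact hc0
        rw [this]
        exact dvd_zero _
      · simp only [hc0, ne_eq, not_false_eq_true, true_implies]
        rw [hasDivisor_iff c s' (by omega)]
        unfold PIdx
        constructor
        · rintro ⟨k, hk1, hkdvd, hkmem⟩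
          obtain ⟨j, hj1, hj2, hj3⟩ := (hS' _).mp hkmem
          have hkj : k = (coins.getD j 0).natAbs := by exact_mod_cast hj3
          refine ⟨j, hj1, hj2, ?_⟩
          rw [← Int.natAbs_dvd_natAbs]
          rw [hkj] at hkdvd
          exact hkdvd
        · rintro ⟨j, hj1, hj2, hjdvd⟩
          refine ⟨(coins.getD j 0).natAbs, ?_, ?_, (hS' _).mpr ⟨j, hj1, hj2, rfl⟩⟩
          · have := hpre j (by omega) hj2
            omega
          · rw [← Int.natAbs_dvd_natAbs] at hjdvd
            exact hjdvd
    by_cases hguard : (c ≠ 0 && !(hasDivisor c s')) = true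
    · rw [if_pos hguard]
      simp only [Bool.and_eq_true, Bool.not_eq_true', decide_eq_true_eq] at hguard
      constructor
      · intro h; exact absurd h (by simp)
      · intro h
        have hP : PIdx coins t := h t (by omega)
        have := hcond.mpr hP hguard.1
        rw [this] at hguard
        exact absurd hguard.2 (by simp)
    · rw [if_neg hguard]
      simp only [Bool.and_eq_true, Bool.not_eq_true', decide_eq_true_eq, not_and] at hguard
      have hP : PIdx coins t := hcond.mp (fun hne => by
        have := hguard hne
        revert this
        cases hasDivisor c s' <;> simp)
      rw [ih s' (by omega) hS']
      constructor
      · intro h i hi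
        rcases Nat.lt_succ_iff_lt_or_eq.mp hi with h' | rfl
        · exact h i h'
        · exact hP
      · intro h i hi
        exact h i (by omega)

theorem b_iff (coins : List Int)
    (hpre : ∀ j : Nat, 1 ≤ j → j + 1 < coins.length → coins.getD j 0 ≠ 0) :
    can_use_greedy_alt coins = true ↔ SpecIdx coins := by
  unfold can_use_greedy_alt SpecIdx
  by_cases hlen : coins.length ≤ 2
  · rw [PySem.List.pyRange_one_eq_nil (by omega)]
    simp only [List.reverse_nil, bLoop, true_iff]
    intro i hi
    omega
  · have hcast : (coins.length : Int) - 2 = ((coins.length - 2 : Nat) : Int) := by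
      omega
    rw [hcast, bLoop_iff coins hpre (coins.length - 2) PySem.Set.empty (by omega)]
    · constructor
      · intro h i hi; exact h i (by omega)
      · intro h i hi; exact h i (by omega)
    · intro x
      simp only [PySem.Set.empty]
      constructor
      · intro h; exact absurd h (List.not_mem_nil)
      · rintro ⟨j, hj1, hj2, -⟩
        omega

-- ===== VERDICT (by name: the statement is the Claim_ definition above) =====
theorem can_use_greedy_spec : Claim_equal_can_use_greedy := by
  intro coins _ hpre
  unfold Spec_can_use_greedy
  rw [pre_iff] at hpre
  exact Bool.eq_iff_iff.mpr ((a_iff coins).trans (b_iff coins hpre).symm)
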